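-- pv_equiv track=rewrite | github.com/jameshgrn/dgov | src/dgov/settlement.py | _expand_to_import_blocks
-- ===== SOURCE A (Python) =====
-- def _is_import_block_line(line: str, in_paren: bool) -> tuple[bool, bool]:
--     """Return (is_part_of_import_block, currently_inside_parens).
--
--     Handles multiline imports like ``from x import (\\n a, b\\n)`` and
--     comment lines interleaved between imports.
--     """
--     stripped = line.strip()
--     if in_paren:
--         # Inside a parenthesized import — everything until closing paren
--         return True, ")" not in stripped
--     if stripped.startswith(("import ", "from ")):
--         return True, "(" in stripped and ")" not in stripped
--     # Blank lines and comments between imports are part of the block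
--     if stripped == "" or stripped.startswith("#"):
--         return True, False
--     return False, False
--
-- def _expand_to_import_blocks(lines: list[str], changed: set[int]) -> set[int]:
--     """Expand changed lines to cover entire import blocks when any import was touched.
--
--     Import reordering is a structural change that affects the whole block.
--     If the worker added or modified any import line, autofix needs to own
--     the entire contiguous import section to apply sorting correctly.
--
--     Handles multiline imports (``from x import (...)``), comment lines
--     between imports, and blank separator lines.
--     """
--     if not changed:
--         return changed
--
--     # Find contiguous import blocks
--     blocks: list[tuple[int, int]] = []
--     i = 0
--     in_paren = False
--     while i < len(lines):
--         is_import, in_paren = _is_import_block_line(lines[i], in_paren)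
--         if is_import:
--             start = i
--             while i < len(lines):
--                 is_import, in_paren = _is_import_block_line(lines[i], in_paren)
--                 if is_import:
--                     i += 1
--                 else:
--                     break
--             # Trim trailing blank/comment-only lines from block boundary
--             end = i
--             while end > start and lines[end - 1].strip() in ("", "#"):
--                 end -= 1
--             if end > start:
--                 blocks.append((start, end))
--         else:
--             i += 1
--
--     expanded = set(changed)
--     for start, end in blocks:
--         if any(ln in changed for ln in range(start, end)):
--             expanded.update(range(start, end))
--     return expanded
-- ===== SOURCE B (Python) =====
-- def _is_import_block_line(line, in_paren):
--     stripped = line.strip()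
--     if in_paren:
--         return True, ")" not in stripped
--     if stripped.startswith(("import ", "from ")):
--         return True, "(" in stripped and ")" not in stripped
--     if stripped == "" or stripped.startswith("#"):
--         return True, False
--     return False, False
--
--
-- def _expand_to_import_blocks(lines, changed):
--     if not changed:
--         return changed
--     # Phase 1: classify every line once, threading the paren state.
--     flags = []
--     in_paren = False
--     for line in lines:
--         flag, in_paren = _is_import_block_line(line, in_paren)
--         flags.append(flag)
--     # Phase 2: close maximal runs of import-lines on the fly, trimming and expanding.
--     expanded = set(changed)
--     start = None
--     for i, flag in enumerate(flags + [False]):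
--         if flag:
--             if start is None:
--                 start = i
--         else:
--             if start is not None:
--                 end = i
--                 while end > start and lines[end - 1].strip() in ("", "#"):
--                     end -= 1
--                 if end > start and not changed.isdisjoint(range(start, end)):
--                     expanded.update(range(start, end))
--                 start = None
--     return expanded
-- ===== Notes on version B (the rewrite author's own statement) =====
-- stated objective: alternative
-- what changed: A's nested index-driven while loops (outer scan with an inner block-consuming loop that re-classifies the block's first line, building a blocks list first) are replaced by a two-phase decomposition: one pass classifies every line exactly once into a boolean flags list, then a single run-closing pass over enumerate(flags+[False]) trims and expands each maximal run as it closes, with no blocks list.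
import Mathlib
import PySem

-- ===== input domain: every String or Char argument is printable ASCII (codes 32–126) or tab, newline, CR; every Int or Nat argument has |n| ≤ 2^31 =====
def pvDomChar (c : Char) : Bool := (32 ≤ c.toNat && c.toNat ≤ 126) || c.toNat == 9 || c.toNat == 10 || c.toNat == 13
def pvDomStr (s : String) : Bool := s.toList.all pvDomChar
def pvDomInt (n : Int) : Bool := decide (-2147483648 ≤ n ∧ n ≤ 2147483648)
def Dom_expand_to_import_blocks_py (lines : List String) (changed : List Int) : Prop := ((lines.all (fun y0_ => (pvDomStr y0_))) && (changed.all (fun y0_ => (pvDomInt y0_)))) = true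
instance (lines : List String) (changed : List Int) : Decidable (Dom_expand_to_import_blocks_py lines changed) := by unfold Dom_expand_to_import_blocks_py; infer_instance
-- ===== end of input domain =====

-- B replaces A's nested index-driven while loops by a classify-once pass plus a single run-closing
-- pass (alternative decomposition, same cost); return values proved equal on the whole domain.

-- ===== PORT A =====
-- _is_import_block_line (shared module helper, used verbatim by both Source A and Source B)
def pvIsImp (line : String) (in_paren : Bool) : Bool × Bool :=
  let s := PySem.Str.strip line
  if in_paren then (true, !(PySem.Str.isIn ")" s))
  else if PySem.Str.startswith s "import " || PySem.Str.startswith s "from " then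
    (true, PySem.Str.isIn "(" s && !(PySem.Str.isIn ")" s))
  else if s == "" || PySem.Str.startswith s "#" then (true, false)
  else (false, false)

-- the trailing-trim while loop 'while end > start and lines[end-1].strip() in ("", "#")'
-- (identical inline loop in Source A and Source B); lines[end-1] is always in range when read,
-- so pyGetD with a dummy default is exact
def pvTrim (lines : List String) (start e : Int) : Int :=
  if _h : start < e then
    let s := PySem.Str.strip (PySem.List.pyGetD lines (e - 1) "")
    if s == "" || s == "#" then pvTrim lines start (e - 1) else e
  else e
termination_by (e - start).toNat
decreasing_by omega

-- A's inner 'while i < len(lines)' loop: rest is the suffix lines[i:]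
def pvInner (rest : List String) (i : Int) (p : Bool) : Int × Bool × List String :=
  match rest with
  | [] => (i, p, [])
  | l :: ls =>
    let r := pvIsImp l p
    if r.1 then pvInner ls (i + 1) r.2 else (i, r.2, l :: ls)

-- A's outer 'while i < len(lines)' loop, building the blocks list; fuel only makes the
-- recursion structurally terminating (2*len+1 outer iterations always suffice)
def pvOuter (lines : List String) (fuel : Nat) (rest : List String) (i : Int) (p : Bool) :
    List (Int × Int) :=
  match fuel, rest with
  | 0, _ => []
  | _ + 1, [] => []
  | fuel + 1, l :: ls =>
    let r := pvIsImp l p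
    if r.1 then
      let t := pvInner (l :: ls) i r.2
      let e := pvTrim lines i t.1
      (if i < e then [(i, e)] else []) ++ pvOuter lines fuel t.2.2 t.1 t.2.1
    else pvOuter lines fuel ls (i + 1) r.2

def expand_to_import_blocks_py (lines : List String) (changed : List Int) : List Int :=
  if changed = [] then changed
  else
    let blocks := pvOuter lines (2 * lines.length + 1) lines 0 false
    blocks.foldl
      (fun exp b =>
        if (PySem.List.pyRange b.1 b.2 1).any (fun ln => PySem.Set.contains changed ln)
        then PySem.Set.update exp (PySem.List.pyRange b.1 b.2 1)
        else exp)
      (PySem.Set.ofList changed)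

-- ===== PORT B =====
def expand_to_import_blocks_py_alt (lines : List String) (changed : List Int) : List Int :=
  if changed = [] then changed
  else
    -- Phase 1: classify every line once
    let flags := (lines.foldl
        (fun (st : List Bool × Bool) line =>
          let r := pvIsImp line st.2
          (st.1 ++ [r.1], r.2)) (([] : List Bool), false)).1
    -- Phase 2: close maximal runs over enumerate(flags + [False])
    (((PySem.List.enumerate (flags ++ [false])).foldl
        (fun (st : PySem.Set Int × Option Int) pr =>
          if pr.2 then
            match st.2 with
            | none => (st.1, some pr.1)
            | some _ => st
          else
            match st.2 with
            | none => st
            | some s =>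
              let e := pvTrim lines s pr.1
              (if s < e ∧ PySem.Set.isdisjoint changed (PySem.List.pyRange s e 1) = false
               then PySem.Set.update st.1 (PySem.List.pyRange s e 1) else st.1, none))
        (PySem.Set.ofList changed, (none : Option Int)))).1

-- ===== PRECONDITION & SPEC =====
def Spec_expand_to_import_blocks_py (lines : List String) (changed : List Int) (out : List Int) : Prop := out = expand_to_import_blocks_py_alt lines changed
instance (lines : List String) (changed : List Int) (out : List Int) : Decidable (Spec_expand_to_import_blocks_py lines changed out) := by unfold Spec_expand_to_import_blocks_py; infer_instance

-- ===== CLAIM (what is proved, stated in full; the proofs are below) =====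
def Claim_equal_expand_to_import_blocks_py : Prop := ∀ (lines : List String) (changed : List Int), Dom_expand_to_import_blocks_py lines changed → Spec_expand_to_import_blocks_py lines changed (expand_to_import_blocks_py lines changed)

-- ===== LEMMAS AND PROOFS =====

-- single-pass classification of all lines (the common spine of both proofs)
def pvClassify : List String → Bool → List Bool
  | [], _ => []
  | l :: ls, p => (pvIsImp l p).1 :: pvClassify ls (pvIsImp l p).2

-- maximal runs of true flags as (start, close-index) pairs, B's traversal order
def pvRuns : Int → Option Int → List Bool → List (Int × Int)
  | _, none, [] => []
  | i, some s, [] => [(s, i)]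
  | i, none, true :: fs => pvRuns (i + 1) (some i) fs
  | i, none, false :: fs => pvRuns (i + 1) none fs
  | i, some s, true :: fs => pvRuns (i + 1) (some s) fs
  | i, some s, false :: fs => (s, i) :: pvRuns (i + 1) none fs

-- trim-filter-update applied to one closed raw run
def pvUpd (lines : List String) (changed : List Int) (S : PySem.Set Int) (b : Int × Int) :
    PySem.Set Int :=
  let e := pvTrim lines b.1 b.2
  if b.1 < e ∧ PySem.Set.isdisjoint changed (PySem.List.pyRange b.1 e 1) = false
  then PySem.Set.update S (PySem.List.pyRange b.1 e 1) else S

-- A's trimmed, nonempty blocks extracted from the raw runs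
def pvBlocksOf (lines : List String) (rs : List (Int × Int)) : List (Int × Int) :=
  rs.flatMap (fun b =>
    let e := pvTrim lines b.1 b.2
    if b.1 < e then [(b.1, e)] else [])

-- a false classification always comes from (and leaves) the non-paren state
theorem pvIsImp_false (l : String) (p : Bool) (h : (pvIsImp l p).1 = false) :
    p = false ∧ (pvIsImp l p).2 = false := by
  cases p with
  | true => exfalso; simp [pvIsImp] at h
  | false =>
    refine ⟨rfl, ?_⟩
    simp only [pvIsImp] at h ⊢
    split_ifs at h ⊢ <;> simp_all

-- re-classifying a block's first line with the paren state it produced is a no-op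
theorem pvIsImp_reclassify (l : String) (p' : Bool) (h : pvIsImp l false = (true, p')) :
    pvIsImp l p' = (true, p') := by
  cases p' with
  | false => exact h
  | true =>
    simp only [pvIsImp] at h ⊢
    split_ifs at h ⊢ <;> simp_all

theorem pvClassify_length (ls : List String) (p : Bool) :
    (pvClassify ls p).length = ls.length := by
  induction ls generalizing p with
  | nil => rfl
  | cons l ls ih => simp [pvClassify, ih]

-- B phase 1 produces pvClassify
theorem pvFlags_eq (ls : List String) (acc : List Bool) (p : Bool) :
    (ls.foldl (fun (st : List Bool × Bool) line =>
        let r := pvIsImp line st.2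
        (st.1 ++ [r.1], r.2)) (acc, p)).1 = acc ++ pvClassify ls p := by
  induction ls generalizing acc p with
  | nil => simp [pvClassify]
  | cons l ls ih => simp [List.foldl_cons, pvClassify, ih]

-- the inner loop consumes exactly the leading true-classified lines
theorem pvInner_spec (ls : List String) (i : Int) (p : Bool) :
    (pvInner ls i p).1 = i + (((pvClassify ls p).takeWhile (fun b => b)).length : Int) ∧
    (pvInner ls i p).2.2 = ls.drop ((pvClassify ls p).takeWhile (fun b => b)).length ∧
    (ls.drop ((pvClassify ls p).takeWhile (fun b => b)).length ≠ [] →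
      (pvInner ls i p).2.1 = false ∧
      pvClassify (ls.drop ((pvClassify ls p).takeWhile (fun b => b)).length) false =
        (pvClassify ls p).drop ((pvClassify ls p).takeWhile (fun b => b)).length) := by
  induction ls generalizing i p with
  | nil => simp [pvInner, pvClassify]
  | cons l ls ih =>
    by_cases hb : (pvIsImp l p).1 = true
    · have h1 := ih (i + 1) (pvIsImp l p).2
      simp [pvInner, pvClassify, hb] at h1 ⊢
      refine ⟨by omega, h1.2.1, h1.2.2⟩
    · simp at hb
      obtain ⟨hp, h2⟩ := pvIsImp_false l p hb
      subst hp
      simp [pvInner, pvClassify, hb, h2]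

-- pvRuns with an open run: the run closes after the leading trues
theorem pvRuns_some (fs : List Bool) (i s : Int) :
    pvRuns i (some s) fs =
      (s, i + ((fs.takeWhile (fun b => b)).length : Int)) ::
        pvRuns (i + ((fs.takeWhile (fun b => b)).length : Int) + 1) none
          (fs.drop ((fs.takeWhile (fun b => b)).length + 1)) := by
  induction fs generalizing i with
  | nil => simp [pvRuns]
  | cons b fs ih =>
    cases b with
    | true =>
      rw [show pvRuns i (some s) (true :: fs) = pvRuns (i + 1) (some s) fs from rfl, ih]
      simp [List.takeWhile_cons]
      constructor
      · omega
      · congr 1; omega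
    | false => simp [pvRuns]

-- at the takeWhile boundary the next flag is false
theorem pvDrop_takeWhile_false (fs : List Bool)
    (h : (fs.takeWhile (fun b => b)).length < fs.length) :
    fs.drop ((fs.takeWhile (fun b => b)).length) =
      false :: fs.drop ((fs.takeWhile (fun b => b)).length + 1) := by
  induction fs with
  | nil => simp at h
  | cons b fs ih =>
    cases b with
    | true =>
      simp only [List.takeWhile_cons] at h ⊢
      simp only [if_true] at h ⊢
      simp only [List.length_cons] at h ⊢
      have := ih (by omega)
      simpa using this
    | false => simp

-- A's outer loop computes exactly the trimmed nonempty blocks of the runs of pvClassify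
theorem pvOuter_spec (lines : List String) (fuel : Nat) (rest : List String) (i : Int)
    (hf : rest.length < fuel) :
    pvOuter lines fuel rest i false =
      pvBlocksOf lines (pvRuns i none (pvClassify rest false)) := by
  induction fuel generalizing rest i with
  | zero => omega
  | succ fuel ih =>
    cases rest with
    | nil => simp [pvOuter, pvClassify, pvRuns, pvBlocksOf]
    | cons l ls =>
      by_cases hb : (pvIsImp l false).1 = true
      · -- a block starts here
        have hre : pvIsImp l (pvIsImp l false).2 = (true, (pvIsImp l false).2) :=
          pvIsImp_reclassify l _ (by rw [← hb])
        have hinner : pvInner (l :: ls) i (pvIsImp l false).2 =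
            pvInner ls (i + 1) (pvIsImp l false).2 := by
          simp [pvInner, hre]
        obtain ⟨h1, h2, h3⟩ := pvInner_spec ls (i + 1) (pvIsImp l false).2
        set fs := pvClassify ls (pvIsImp l false).2 with hfs
        set k := (fs.takeWhile (fun b => b)).length with hk
        have hfslen : fs.length = ls.length := by rw [hfs]; exact pvClassify_length ls _
        have hcl : pvClassify (l :: ls) false = true :: fs := by
          rw [pvClassify, hb, hfs]
        have htail : pvOuter lines fuel (ls.drop k) (i + 1 + (k : Int))
              (pvInner ls (i + 1) (pvIsImp l false).2).2.1 =
            pvBlocksOf lines (pvRuns (i + 1 + (k : Int) + 1) none (fs.drop (k + 1))) := by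
          by_cases hemp : ls.drop k = []
          · have hkfs : ls.length ≤ k := by
              have := List.drop_eq_nil_iff.mp hemp; omega
            rw [hemp, List.drop_eq_nil_iff.mpr (by omega)]
            cases fuel <;> simp [pvOuter, pvRuns, pvBlocksOf]
          · obtain ⟨hp2, hcl2⟩ := h3 hemp
            have hklt : k < fs.length := by
              rcases Nat.lt_or_ge k fs.length with h | h
              · exact h
              · exact absurd (List.drop_eq_nil_iff.mpr (by omega)) hemp
            rw [hp2, ih (ls.drop k) (i + 1 + (k : Int))
                (by simp only [List.length_drop]; simp only [List.length_cons] at hf; omega)]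
            rw [hcl2]
            have hdrop : fs.drop k = false :: fs.drop (k + 1) := by
              rw [hk]; exact pvDrop_takeWhile_false fs (by rw [← hk]; exact hklt)
            rw [hdrop]
            rfl
        rw [show pvOuter lines (fuel + 1) (l :: ls) i false =
              (if (pvIsImp l false).1 = true then
                (if i < pvTrim lines i (pvInner (l :: ls) i (pvIsImp l false).2).1 then
                  [(i, pvTrim lines i (pvInner (l :: ls) i (pvIsImp l false).2).1)] else []) ++
                pvOuter lines fuel (pvInner (l :: ls) i (pvIsImp l false).2).2.2
                  (pvInner (l :: ls) i (pvIsImp l false).2).1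
                  (pvInner (l :: ls) i (pvIsImp l false).2).2.1
              else pvOuter lines fuel ls (i + 1) (pvIsImp l false).2) from rfl,
          if_pos hb, hinner, h1, h2, htail]
        rw [hcl, show pvRuns i none (true :: fs) = pvRuns (i + 1) (some i) fs from rfl,
          pvRuns_some fs (i + 1) i, ← hk]
        simp only [pvBlocksOf, List.flatMap_cons]
      · -- not an import line: advance by one
        simp only [Bool.not_eq_true] at hb
        obtain ⟨-, hp2⟩ := pvIsImp_false l false hb
        rw [show pvOuter lines (fuel + 1) (l :: ls) i false =
              (if (pvIsImp l false).1 = true then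
                (if i < pvTrim lines i (pvInner (l :: ls) i (pvIsImp l false).2).1 then
                  [(i, pvTrim lines i (pvInner (l :: ls) i (pvIsImp l false).2).1)] else []) ++
                pvOuter lines fuel (pvInner (l :: ls) i (pvIsImp l false).2).2.2
                  (pvInner (l :: ls) i (pvIsImp l false).2).1
                  (pvInner (l :: ls) i (pvIsImp l false).2).2.1
              else pvOuter lines fuel ls (i + 1) (pvIsImp l false).2) from rfl,
          if_neg (by simp [hb]), hp2,
          ih ls (i + 1) (by simp only [List.length_cons] at hf; omega)]
        rw [show pvClassify (l :: ls) false =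
              (pvIsImp l false).1 :: pvClassify ls (pvIsImp l false).2 from rfl, hb, hp2]
        rfl

-- A's any-overlap test agrees with B's isdisjoint test
theorem pvOverlap_eq (changed : List Int) (r : List Int) :
    ((r.any (fun ln => PySem.Set.contains changed ln)) = true) ↔
      (PySem.Set.isdisjoint changed r = false) := by
  rw [Bool.eq_false_iff, Ne, PySem.Set.isdisjoint_iff]
  simp only [List.any_eq_true, PySem.Set.contains_iff]
  constructor
  · rintro ⟨x, hxr, hxc⟩ hall
    exact (hall x hxc) hxr
  · intro h
    by_contra hn
    push_neg at hn
    exact h fun x hxc hxr => (hn x hxr) hxc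

-- folding A's test-and-update over the trimmed blocks = folding pvUpd over the raw runs
theorem pvFold_blocks (lines : List String) (changed : List Int) (rs : List (Int × Int))
    (S : PySem.Set Int) :
    (pvBlocksOf lines rs).foldl
        (fun exp b =>
          if (PySem.List.pyRange b.1 b.2 1).any (fun ln => PySem.Set.contains changed ln)
          then PySem.Set.update exp (PySem.List.pyRange b.1 b.2 1)
          else exp) S =
      rs.foldl (pvUpd lines changed) S := by
  induction rs generalizing S with
  | nil => simp [pvBlocksOf]
  | cons b rs ih =>
    rw [pvBlocksOf, List.flatMap_cons, ← pvBlocksOf]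
    by_cases he : b.1 < pvTrim lines b.1 b.2
    · simp only [he, if_true, List.foldl_append, List.foldl_cons, List.foldl_nil]
      rw [ih]
      congr 1
      by_cases hov : PySem.Set.isdisjoint changed
          (PySem.List.pyRange b.1 (pvTrim lines b.1 b.2) 1) = false
      · rw [if_pos ((pvOverlap_eq _ _).mpr hov), pvUpd, if_pos ⟨he, hov⟩]
      · rw [if_neg (fun h => hov ((pvOverlap_eq _ _).mp h)), pvUpd, if_neg (by tauto)]
    · simp only [he, if_false, List.nil_append]
      rw [ih, List.foldl_cons]
      congr 1
      rw [pvUpd, if_neg (by tauto)]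

-- B's phase-2 fold over enumerate = folding pvUpd over pvRuns
theorem pvBfold (lines : List String) (changed : List Int) (fs : List Bool) (i : Int)
    (o : Option Int) (S : PySem.Set Int) :
    (PySem.List.enumerate (fs ++ [false]) i).foldl
        (fun (st : PySem.Set Int × Option Int) pr =>
          if pr.2 then
            match st.2 with
            | none => (st.1, some pr.1)
            | some _ => st
          else
            match st.2 with
            | none => st
            | some s =>
              (if s < pvTrim lines s pr.1 ∧
                  PySem.Set.isdisjoint changed
                    (PySem.List.pyRange s (pvTrim lines s pr.1) 1) = false
               then PySem.Set.update st.1 (PySem.List.pyRange s (pvTrim lines s pr.1) 1)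
               else st.1, none))
        (S, o) =
      ((pvRuns i o fs).foldl (pvUpd lines changed) S, none) := by
  induction fs generalizing i o S with
  | nil =>
    cases o with
    | none => simp [PySem.List.enumerate_cons, pvRuns]
    | some s => simp [PySem.List.enumerate_cons, pvRuns, pvUpd]
  | cons b fs ih =>
    rw [List.cons_append, PySem.List.enumerate_cons, List.foldl_cons]
    cases b with
    | true =>
      cases o with
      | none =>
        rw [show pvRuns i none (true :: fs) = pvRuns (i + 1) (some i) fs from rfl]
        exact ih (i + 1) (some i) S
      | some s =>
        rw [show pvRuns i (some s) (true :: fs) = pvRuns (i + 1) (some s) fs from rfl]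
        exact ih (i + 1) (some s) S
    | false =>
      cases o with
      | none =>
        rw [show pvRuns i none (false :: fs) = pvRuns (i + 1) none fs from rfl]
        exact ih (i + 1) none S
      | some s =>
        rw [show pvRuns i (some s) (false :: fs) = (s, i) :: pvRuns (i + 1) none fs from rfl,
          List.foldl_cons]
        exact ih (i + 1) none (pvUpd lines changed S (s, i))

-- ===== VERDICT (by name: the statement is the Claim_ definition above) =====
theorem expand_to_import_blocks_py_spec : Claim_equal_expand_to_import_blocks_py := by
  intro lines changed _
  unfold Spec_expand_to_import_blocks_py
  by_cases hc : changed = []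
  · simp [expand_to_import_blocks_py, expand_to_import_blocks_py_alt, hc]
  · simp only [expand_to_import_blocks_py, expand_to_import_blocks_py_alt, if_neg hc]
    rw [pvOuter_spec lines (2 * lines.length + 1) lines 0 (by omega), pvFold_blocks,
      pvFlags_eq lines [] false, List.nil_append,
      pvBfold lines changed (pvClassify lines false) 0 none (PySem.Set.ofList changed)]
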